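-- pv_equiv track=rewrite | github.com/Tornike-Skhulukhia/browser_automation_helper | multi_br.py | _split_urls_list
-- ===== SOURCE A (Python) =====
-- def _split_urls_list(urls, number):
--     '''
--     split given urls list(not set!) into sublists, each one
--     containing approximately same number of urls.
--
--     For more convenience, result is the dictionary
--     with numbers from 0 to given (number - 1) as keys
--     and appropriate sublists as values.
--
--     useful when using multiple processes, to pass
--     these sublists as separate arguments.
--     '''
--     # breakpoint()
--     link_num_per_proc = len(urls) // number
--
--     if len(urls) % number != 0:
--         link_num_per_proc += 1
--
--     lists = {i: [] for i in range(number)}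
--
--     for num in lists:
--         add_me = urls[
--             num * link_num_per_proc: (num + 1) * link_num_per_proc]
--         lists[num].extend(add_me)
--
--     return lists
-- ===== SOURCE B (Python) =====
-- def _split_urls_list(urls, number):
--     link_num_per_proc = len(urls) // number
--     if len(urls) % number != 0:
--         link_num_per_proc += 1
--     rest = list(reversed(urls))
--     lists = {}
--     for i in range(number):
--         bucket = []
--         while rest and len(bucket) < link_num_per_proc:
--             bucket.append(rest.pop())
--         lists[i] = bucket
--     return lists
-- ===== Notes on version B (the rewrite author's own statement) =====
-- stated objective: alternative
-- what changed: Replaces A's per-bucket slicing at computed offsets into the original list (pre-initialized dict, extend with urls[num*chunk:(num+1)*chunk]) by a consuming decomposition: a reversed working list from which each bucket pops its urls one by one into a fresh bucket, building the dict incrementally with no index arithmetic.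
import Mathlib
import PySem

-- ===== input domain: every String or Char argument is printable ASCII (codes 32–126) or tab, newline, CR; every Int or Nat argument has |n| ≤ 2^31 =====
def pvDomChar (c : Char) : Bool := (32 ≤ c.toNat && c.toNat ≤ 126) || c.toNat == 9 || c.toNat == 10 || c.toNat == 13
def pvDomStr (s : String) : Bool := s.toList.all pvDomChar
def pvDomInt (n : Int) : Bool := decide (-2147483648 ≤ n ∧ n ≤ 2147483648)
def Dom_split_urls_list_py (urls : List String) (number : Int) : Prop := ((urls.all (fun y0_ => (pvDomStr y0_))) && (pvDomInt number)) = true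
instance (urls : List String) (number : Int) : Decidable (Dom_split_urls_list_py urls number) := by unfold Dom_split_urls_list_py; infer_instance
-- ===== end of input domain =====

-- B replaces A's per-bucket slicing at computed offsets into the original list by a
-- consuming decomposition: a reversed working list from which each bucket pops its
-- urls one by one (alternative decomposition, linear like A).

-- ===== PORT A =====
def split_urls_list_py (urls : List String) (number : Int) : List (Int × List String) :=
  let link0 : Int := PySem.Int.floordiv (urls.length : Int) number
  let link : Int := if PySem.Int.mod (urls.length : Int) number ≠ 0 then link0 + 1 else link0
  let lists : PySem.Dict Int (List String) :=
    (PySem.List.pyRange 0 number 1).foldl (fun d i => d.insert i []) PySem.Dict.empty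
  (lists.keys.foldl
    (fun d num => d.modify num []
      (fun xs => xs ++ PySem.List.slice urls (some (num * link)) (some ((num + 1) * link))))
    lists).items

-- ===== PORT B =====
/-- Python's inner `while rest and len(bucket) < link: bucket.append(rest.pop())`;
`rest.pop()` is `PySem.List.pop? rest` (exact: pops the last element). -/
def pvFill (link : Int) (rest bucket : List String) : List String × List String :=
  if h : rest ≠ [] ∧ (bucket.length : Int) < link then
    match hp : PySem.List.pop? rest with
    | some p => pvFill link p.2 (bucket ++ [p.1])
    | none => (bucket, rest)
  else (bucket, rest)
termination_by rest.length
decreasing_by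
  have := PySem.List.length_of_pop?_eq_some rest hp
  omega

def split_urls_list_py_alt (urls : List String) (number : Int) : List (Int × List String) :=
  let link0 : Int := PySem.Int.floordiv (urls.length : Int) number
  let link : Int := if PySem.Int.mod (urls.length : Int) number ≠ 0 then link0 + 1 else link0
  ((PySem.List.pyRange 0 number 1).foldl
    (fun (s : PySem.Dict Int (List String) × List String) i =>
      let p := pvFill link s.2 []
      (s.1.insert i p.1, p.2))
    (PySem.Dict.empty, urls.reverse)).1.items

-- ===== PRECONDITION & SPEC =====
-- Pre_ excludes only number = 0, where A (and B) raise ZeroDivisionError.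
def Pre_split_urls_list_py (urls : List String) (number : Int) : Prop := number ≠ 0
instance (urls : List String) (number : Int) : Decidable (Pre_split_urls_list_py urls number) := by unfold Pre_split_urls_list_py; infer_instance
def pvWitness_split_urls_list_py : List String × Int := (["a", "b", "c"], 2)

def Spec_split_urls_list_py (urls : List String) (number : Int) (out : List (Int × List String)) : Prop := out = split_urls_list_py_alt urls number
instance (urls : List String) (number : Int) (out : List (Int × List String)) : Decidable (Spec_split_urls_list_py urls number out) := by unfold Spec_split_urls_list_py; infer_instance

-- ===== CLAIM (what is proved, stated in full; the proofs are below) =====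
def Claim_equal_split_urls_list_py : Prop := ∀ (urls : List String) (number : Int), Dom_split_urls_list_py urls number → Pre_split_urls_list_py urls number → Spec_split_urls_list_py urls number (split_urls_list_py urls number)

-- ===== LEMMAS AND PROOFS =====

/-- A dict over the key list `ks` whose value at `i` is `g i`. -/
def pvMkm (ks : List Int) (g : Int → List String) : PySem.Dict Int (List String) :=
  PySem.Dict.mk (ks.map fun i => (i, g i))

theorem pvMkm_congr {ks : List Int} {g1 g2 : Int → List String}
    (h : ∀ i ∈ ks, g1 i = g2 i) : pvMkm ks g1 = pvMkm ks g2 := by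
  unfold pvMkm
  exact congrArg PySem.Dict.mk (List.map_congr_left fun i hi => by rw [h i hi])

theorem pvMkm_keys (ks : List Int) (g : Int → List String) : (pvMkm ks g).keys = ks := by
  simp [pvMkm, PySem.Dict.keys, List.map_map, Function.comp_def]

theorem pvMkm_contains (ks : List Int) (g : Int → List String) (k : Int) (hk : k ∈ ks) :
    (pvMkm ks g).contains k = true := by
  simp only [pvMkm, PySem.Dict.contains, List.any_map, List.any_eq_true]
  exact ⟨k, hk, by simp⟩

theorem pvMkm_contains_false (ks : List Int) (g : Int → List String) (k : Int) (hk : k ∉ ks) :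
    (pvMkm ks g).contains k = false := by
  simp only [pvMkm, PySem.Dict.contains, List.any_map, List.any_eq_false]
  intro i hi
  simp only [Function.comp_apply]
  intro h
  apply hk
  rw [← eq_of_beq h]
  exact hi

theorem pvMkm_getD (ks : List Int) (g : Int → List String) (k : Int) (d : List String)
    (hk : k ∈ ks) : (pvMkm ks g).getD k d = g k := by
  induction ks with
  | nil => cases hk
  | cons a t ih =>
      by_cases h : a = k
      · subst h
        simp [pvMkm, PySem.Dict.getD, PySem.Dict.get?]
      · have hk' : k ∈ t := by
          rcases List.mem_cons.mp hk with h' | h'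
          · exact absurd h'.symm h
          · exact h'
        have := ih hk'
        simpa [pvMkm, PySem.Dict.getD, PySem.Dict.get?, List.find?, h] using this

theorem pvMkm_insert (ks : List Int) (g : Int → List String) (k : Int) (v : List String)
    (hk : k ∈ ks) :
    (pvMkm ks g).insert k v = pvMkm ks (fun i => if i = k then v else g i) := by
  simp only [PySem.Dict.insert, pvMkm_contains ks g k hk, if_true]
  unfold pvMkm
  congr 1
  simp only [List.map_map]
  apply List.map_congr_left
  intro i _
  by_cases h : i = k <;> simp [h]

theorem pvMkm_insert_fresh (ks : List Int) (g : Int → List String) (k : Int) (v : List String)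
    (hk : k ∉ ks) :
    (pvMkm ks g).insert k v
      = PySem.Dict.mk ((ks.map fun i => (i, g i)) ++ [(k, v)]) := by
  have hc := pvMkm_contains_false ks g k hk
  unfold pvMkm at hc ⊢
  simp [PySem.Dict.insert, hc]

theorem pvMkm_modify (ks : List Int) (g : Int → List String) (k : Int)
    (f : List String → List String) (hk : k ∈ ks) :
    (pvMkm ks g).modify k [] f = pvMkm ks (fun i => if i = k then f (g i) else g i) := by
  simp only [PySem.Dict.modify, pvMkm_getD ks g k [] hk, pvMkm_insert ks g k _ hk]
  exact pvMkm_congr fun i _ => by by_cases h : i = k <;> simp [h]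

/-- Folding fresh inserts from the empty dict builds the dict over the key list. -/
theorem pvInit (v : List String) (ks : List Int) (pre : List (Int × List String))
    (hnd : ks.Nodup) (hf : ∀ i ∈ ks, ∀ p ∈ pre, p.1 ≠ i) :
    ks.foldl (fun d i => d.insert i v) (PySem.Dict.mk pre)
      = PySem.Dict.mk (pre ++ ks.map fun i => (i, v)) := by
  induction ks generalizing pre with
  | nil => simp
  | cons a t ih =>
      have hc : (PySem.Dict.mk pre).contains a = false := by
        simp only [PySem.Dict.contains, List.any_eq_false]
        intro p hp
        simpa using hf a (by simp) p hp
      have hins : (PySem.Dict.mk pre).insert a v = PySem.Dict.mk (pre ++ [(a, v)]) := by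
        simp [PySem.Dict.insert, hc]
      rw [List.foldl_cons, hins,
        ih (pre ++ [(a, v)]) hnd.of_cons (by
          intro i hi p hp
          rcases List.mem_append.mp hp with h' | h'
          · exact hf i (by simp [hi]) p h'
          · have : p = (a, v) := by simpa using h'
            subst this
            intro h
            apply (List.nodup_cons.mp hnd).1
            have ha : a = i := h
            rw [ha]
            exact hi)]
      simp

/-- A's loop: one modify per key, each key hit once. -/
theorem pvFoldModify (ks : List Int) (F : Int → List String → List String) :
    ∀ (js : List Int) (g : Int → List String), js.Nodup → (∀ j ∈ js, j ∈ ks) →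
    js.foldl (fun d j => d.modify j [] (F j)) (pvMkm ks g)
      = pvMkm ks (fun i => if i ∈ js then F i (g i) else g i) := by
  intro js
  induction js with
  | nil => intro g _ _; simp
  | cons a t ih =>
      intro g hnd hmem
      rw [List.foldl_cons, pvMkm_modify ks g a (F a) (hmem a (by simp)),
        ih _ hnd.of_cons (fun j hj => hmem j (by simp [hj]))]
      have hat : a ∉ t := (List.nodup_cons.mp hnd).1
      apply pvMkm_congr
      intro i _
      by_cases hit : i ∈ t
      · have hia : i ≠ a := fun h => hat (h ▸ hit)
        simp [hit, hia]
      · by_cases hia : i = a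
        · subst hia; simp [hit]
        · simp [hit, hia]

/-- `pvFill` takes `k` elements off the back of `rest` (in reverse order) into `bucket`. -/
theorem pvFill_spec (c : Nat) : ∀ (k : Nat) (rest bucket : List String),
    bucket.length + k = c →
    pvFill (c : Int) rest bucket = (bucket ++ rest.reverse.take k, rest.take (rest.length - k)) := by
  intro k
  induction k with
  | zero =>
      intro rest bucket hb
      rw [pvFill.eq_def, dif_neg (by push_cast; omega)]
      simp
  | succ k ih =>
      intro rest bucket hb
      rcases List.eq_nil_or_concat rest with rfl | ⟨ys, y, rfl⟩
      · rw [pvFill.eq_def, dif_neg (by simp)]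
        simp
      · simp only [List.concat_eq_append]
        rw [pvFill.eq_def, dif_pos ⟨by simp, by push_cast; omega⟩]
        split
        case h_2 hp =>
          rw [PySem.List.pop?_last] at hp
          cases hp
        case h_1 p hp =>
        rw [PySem.List.pop?_last] at hp
        obtain rfl : p = (y, ys) := by injection hp with h'; exact h'.symm
        rw [ih ys (bucket ++ [y]) (by simp; omega)]
        simp only [Prod.mk.injEq]
        refine ⟨by simp, ?_⟩
        rw [List.take_append_of_le_length (by simp), List.length_append]
        simp

/-- B's loop invariant: after `n` buckets, bucket `i` holds `take cN` of `drop (i*cN)`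
and the working list is the reverse of `urls.drop (n*cN)`. -/
theorem pvConsume (urls : List String) (cN : Nat) :
    ∀ (n : Nat),
    (PySem.List.pyRange 0 (n : Int) 1).foldl
        (fun (s : PySem.Dict Int (List String) × List String) i =>
          let p := pvFill (cN : Int) s.2 []
          (s.1.insert i p.1, p.2))
        (PySem.Dict.empty, urls.reverse)
      = (pvMkm (PySem.List.pyRange 0 (n : Int) 1)
            (fun i => (urls.drop (i.toNat * cN)).take cN),
         (urls.drop (n * cN)).reverse) := by
  intro n
  induction n with
  | zero =>
      simp [PySem.List.pyRange_one_eq_nil (le_refl (0 : Int)), pvMkm, PySem.Dict.empty]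
  | succ n ih =>
      have hcast : ((n + 1 : Nat) : Int) = (n : Int) + 1 := by push_cast; ring
      rw [hcast, PySem.List.pyRange_one_succ_right (by positivity), List.foldl_append, ih]
      simp only [List.foldl_cons, List.foldl_nil]
      have hnm : (n : Int) ∉ PySem.List.pyRange 0 (n : Int) 1 := by
        rw [PySem.List.mem_pyRange_one]; omega
      rw [pvFill_spec cN cN _ [] (by simp)]
      simp only [List.nil_append, List.reverse_reverse, List.length_reverse]
      rw [← List.reverse_drop, pvMkm_insert_fresh _ _ _ _ hnm]
      simp only [Prod.mk.injEq]
      refine ⟨?_, ?_⟩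
      · unfold pvMkm
        rw [List.map_append]
        simp
      · rw [List.drop_drop]
        congr 2
        ring

-- ===== VERDICT (by name: the statement is the Claim_ definition above) =====
theorem split_urls_list_py_spec : Claim_equal_split_urls_list_py := by
  intro urls number _ hpre
  unfold Spec_split_urls_list_py
  rcases lt_or_gt_of_ne hpre with hneg | hpos
  · -- number < 0: range is empty on both sides
    simp [split_urls_list_py, split_urls_list_py_alt,
      PySem.List.pyRange_one_eq_nil (le_of_lt hneg),
      PySem.Dict.empty, PySem.Dict.keys]
  · obtain ⟨n, rfl⟩ : ∃ n : Nat, number = (n : Int) :=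
      ⟨number.toNat, (Int.toNat_of_nonneg (by omega)).symm⟩
    have hn : 0 < n := by exact_mod_cast hpos
    obtain ⟨cN, hcdef⟩ : ∃ cN : Nat,
        cN = (if urls.length % n = 0 then urls.length / n else urls.length / n + 1) :=
      ⟨_, rfl⟩
    have hc : (if PySem.Int.mod (urls.length : Int) (n : Int) ≠ 0
          then PySem.Int.floordiv (urls.length : Int) (n : Int) + 1
          else PySem.Int.floordiv (urls.length : Int) (n : Int)) = (cN : Int) := by
      rw [PySem.Int.floordiv_natCast, PySem.Int.mod_natCast, hcdef]
      by_cases h : urls.length % n = 0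
      · rw [if_neg (by simp [h]), if_pos h]
      · rw [if_pos (by exact_mod_cast h), if_neg h]
        push_cast
        ring
    have hnd : (PySem.List.pyRange 0 (n : Int) 1).Nodup := PySem.List.nodup_pyRange_one 0 (n : Int)
    have hinit : (PySem.List.pyRange 0 (n : Int) 1).foldl
          (fun d i => d.insert i ([] : List String)) PySem.Dict.empty
        = pvMkm (PySem.List.pyRange 0 (n : Int) 1) (fun _ => []) := by
      have := pvInit [] (PySem.List.pyRange 0 (n : Int) 1) [] hnd (by intro i _ p hp; cases hp)
      simpa [pvMkm, PySem.Dict.empty] using this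
    simp only [split_urls_list_py, split_urls_list_py_alt]
    rw [hc, hinit, pvMkm_keys,
      pvFoldModify (PySem.List.pyRange 0 (n : Int) 1)
        (fun num xs => xs ++ PySem.List.slice urls (some (num * (cN : Int)))
          (some ((num + 1) * (cN : Int))))
        (PySem.List.pyRange 0 (n : Int) 1) (fun _ => []) hnd (fun j hj => hj),
      pvConsume urls cN n]
    show List.map _ _ = List.map _ _
    apply List.map_congr_left
    intro i hmem
    have hi := hmem
    rw [PySem.List.mem_pyRange_one] at hi
    obtain ⟨j, rfl⟩ : ∃ j : Nat, i = (j : Int) := ⟨i.toNat, (Int.toNat_of_nonneg hi.1).symm⟩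
    simp only [Int.toNat_natCast]
    rw [if_pos hmem, List.nil_append]
    have e1 : ((j : Int) * (cN : Int)) = ((j * cN : Nat) : Int) := by push_cast; ring
    have e2 : (((j : Int) + 1) * (cN : Int)) = ((j * cN : Nat) : Int) + ((cN : Nat) : Int) := by
      push_cast; ring
    rw [e1, e2, PySem.List.slice_natCast_add]
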